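-- pv_equiv track=rewrite | github.com/dhruv-15-03/AI-court-AI | metrics_dashboard.py | calculate_milestones
-- ===== SOURCE A (Python) =====
-- def calculate_milestones(total):
--     """Calculate progress to milestones"""
--     milestones = [1000, 5000, 10000, 20000, 50000, 100000]
--
--     completed = [m for m in milestones if total >= m]
--     next_milestone = None
--     for m in milestones:
--         if total < m:
--             next_milestone = m
--             break
--
--     return completed, next_milestone
-- ===== SOURCE B (Python) =====
-- def calculate_milestones(total):
--     """Calculate progress to milestones"""
--     milestones = [1000, 5000, 10000, 20000, 50000, 100000]
--     # binary search for the partition point i = number of milestones <= total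
--     lo, hi = 0, len(milestones)
--     while lo < hi:
--         mid = (lo + hi) // 2
--         if milestones[mid] <= total:
--             lo = mid + 1
--         else:
--             hi = mid
--     completed = milestones[:lo]
--     next_milestone = milestones[lo] if lo < len(milestones) else None
--     return completed, next_milestone
-- ===== Notes on version B (the rewrite author's own statement) =====
-- stated objective: alternative
-- what changed: Replaces A's two linear passes (a filter for completed milestones and a first-match loop for the next one) with a single hand-written binary search for the partition point, from which completed is a prefix slice and next is an index lookup.
import Mathlib
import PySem

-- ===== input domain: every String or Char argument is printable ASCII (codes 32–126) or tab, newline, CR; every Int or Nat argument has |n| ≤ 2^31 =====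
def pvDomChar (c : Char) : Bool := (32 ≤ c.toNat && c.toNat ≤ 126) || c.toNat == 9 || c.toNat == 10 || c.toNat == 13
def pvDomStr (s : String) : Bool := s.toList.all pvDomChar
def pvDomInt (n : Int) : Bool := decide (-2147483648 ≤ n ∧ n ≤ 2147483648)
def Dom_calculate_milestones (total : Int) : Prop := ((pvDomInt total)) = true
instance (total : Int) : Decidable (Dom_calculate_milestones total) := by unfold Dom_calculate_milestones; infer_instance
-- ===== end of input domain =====

-- ===== PORT A =====
-- header: B replaces A's two linear passes (a filter and a first-match loop) with one
-- hand-written binary search for the partition point (objective: alternative).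
-- first milestone m with total < m (Python's for-loop with break)
def firstAbove (total : Int) : List Int → Option Int
  | [] => none
  | m :: rest => if total < m then some m else firstAbove total rest

def calculate_milestones (total : Int) : List Int × Option Int :=
  let milestones : List Int := [1000, 5000, 10000, 20000, 50000, 100000]
  let completed := milestones.filter (fun m => total ≥ m)
  let next_milestone := firstAbove total milestones
  (completed, next_milestone)

-- ===== PORT B =====
def milestonesB : List Int := [1000, 5000, 10000, 20000, 50000, 100000]

-- the while-loop of Source B: binary search for the partition point
def bsLoop (total : Int) (lo hi : Nat) : Nat :=
  if lo < hi then
    let mid := (lo + hi) / 2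
    if milestonesB.getD mid 0 ≤ total then bsLoop total (mid + 1) hi
    else bsLoop total lo mid
  else lo
termination_by hi - lo
decreasing_by all_goals omega

def calculate_milestones_alt (total : Int) : List Int × Option Int :=
  let i := bsLoop total 0 milestonesB.length
  let completed := milestonesB.take i
  let next_milestone := if i < milestonesB.length then some (milestonesB.getD i 0) else none
  (completed, next_milestone)

-- ===== PRECONDITION & SPEC =====
def Spec_calculate_milestones (total : Int) (out : List Int × Option Int) : Prop := out = calculate_milestones_alt total
instance (total : Int) (out : List Int × Option Int) : Decidable (Spec_calculate_milestones total out) := by unfold Spec_calculate_milestones; infer_instance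

-- ===== CLAIM (what is proved, stated in full; the proofs are below) =====
def Claim_equal_calculate_milestones : Prop := ∀ (total : Int), Dom_calculate_milestones total → Spec_calculate_milestones total (calculate_milestones total)

-- ===== LEMMAS AND PROOFS =====

-- ===== VERDICT (by name: the statement is the Claim_ definition above) =====
theorem calculate_milestones_spec : Claim_equal_calculate_milestones := by
  intro t _
  unfold Spec_calculate_milestones calculate_milestones calculate_milestones_alt
  by_cases h1 : t < 1000
  · (simp [bsLoop, milestonesB, firstAbove]) <;> split_ifs <;> simp_all <;> omega
  by_cases h2 : t < 5000
  · (simp [bsLoop, milestonesB, firstAbove]) <;> split_ifs <;> simp_all <;> omega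
  by_cases h3 : t < 10000
  · (simp [bsLoop, milestonesB, firstAbove]) <;> split_ifs <;> simp_all <;> omega
  by_cases h4 : t < 20000
  · (simp [bsLoop, milestonesB, firstAbove]) <;> split_ifs <;> simp_all <;> omega
  by_cases h5 : t < 50000
  · (simp [bsLoop, milestonesB, firstAbove]) <;> split_ifs <;> simp_all <;> omega
  by_cases h6 : t < 100000
  · (simp [bsLoop, milestonesB, firstAbove]) <;> split_ifs <;> simp_all <;> omega
  · (simp [bsLoop, milestonesB, firstAbove]) <;> split_ifs <;> simp_all <;> omega
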